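-- pv_equiv track=rewrite | github.com/agntcy/dir | extensions/trust_ranking/reference_ranker.py | _top_reasons
-- ===== SOURCE A (Python) =====
-- from typing import List, Dict, Any, Tuple
--
-- def _top_reasons(reasons: List[str], limit: int = 3) -> List[str]:
--     # Keep unique, preserve order
--     out = []
--     seen = set()
--     for r in reasons:
--         r = r.strip()
--         if not r or r in seen:
--             continue
--         out.append(r)
--         seen.add(r)
--         if len(out) >= limit:
--             break
--     return out
-- ===== SOURCE B (Python) =====
-- def _top_reasons(reasons, limit=3):
--     """Top `limit` unique non-empty trimmed reasons, first occurrence wins."""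
--     uniq = []
--     vals = [s.strip() for s in reasons]
--     while vals:
--         head = vals[0]
--         vals = [v for v in vals[1:] if v != head]
--         if head:
--             uniq.append(head)
--     return uniq[:limit]
-- ===== Notes on version B (the rewrite author's own statement) =====
-- stated objective: alternative
-- what changed: Replaces the seen-set accumulator scan with early break by a worklist loop that takes the head and filters its later duplicates out of the remaining values (no auxiliary set), then slices the full dedup list to limit.
-- intended difference: For non-positive limit with at least one non-empty trimmed string, A returns a one-element list (it appends before checking the limit) while B returns the plain slice uniq[:limit] (empty for limit 0); B's is the intended 'at most limit reasons' result. — e.g. on _top_reasons(["x"], 0): A returns ["x"], B returns []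
import Mathlib
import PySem

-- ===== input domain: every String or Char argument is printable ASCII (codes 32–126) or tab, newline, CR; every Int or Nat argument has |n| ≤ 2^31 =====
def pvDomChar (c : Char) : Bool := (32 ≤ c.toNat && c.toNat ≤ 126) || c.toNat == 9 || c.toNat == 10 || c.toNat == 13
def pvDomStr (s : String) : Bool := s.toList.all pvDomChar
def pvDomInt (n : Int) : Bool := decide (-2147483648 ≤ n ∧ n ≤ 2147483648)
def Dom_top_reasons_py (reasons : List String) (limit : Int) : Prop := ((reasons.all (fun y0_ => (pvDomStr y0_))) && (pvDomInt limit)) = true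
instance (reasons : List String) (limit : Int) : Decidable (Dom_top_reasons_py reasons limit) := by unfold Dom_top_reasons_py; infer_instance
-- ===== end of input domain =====

-- B replaces A's seen-set loop by a head/filter-tail structural recursion plus a final slice;
-- on non-positive limits B returns the plain slice instead of A's accidental one-element list.

-- ===== PORT A =====
-- A's loop: strip, skip empty/seen, append to out and seen, break when len(out) >= limit
def topLoopA (rs : List String) (out : List String) (seen : PySem.Set String) (limit : Int) : List String :=
  match rs with
  | [] => out
  | r :: rest =>
    let r := PySem.Str.strip r
    if r = "" ∨ PySem.Set.contains seen r then topLoopA rest out seen limit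
    else
      let out := out ++ [r]
      let seen := PySem.Set.add seen r
      if limit ≤ (out.length : Int) then out
      else topLoopA rest out seen limit

def top_reasons_py (reasons : List String) (limit : Int) : List String :=
  topLoopA reasons [] PySem.Set.empty limit

-- ===== PORT B =====
-- Source B's while loop: take the head, filter its duplicates out of the rest, keep it if non-empty
def dedupLoop (vals : List String) (uniq : List String) : List String :=
  match vals with
  | [] => uniq
  | head :: tail =>
    let vals := tail.filter (fun v => v != head)
    if head != "" then dedupLoop vals (uniq ++ [head]) else dedupLoop vals uniq
termination_by vals.length
decreasing_by
  all_goals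
    simp only [List.length_unattach]
    exact Nat.lt_succ_of_le (le_trans (List.length_filter_le _ _) (le_of_eq List.length_attach))

def top_reasons_py_alt (reasons : List String) (limit : Int) : List String :=
  PySem.List.slice (dedupLoop (reasons.map PySem.Str.strip) []) none (some limit)

-- ===== PRECONDITION & SPEC =====
-- For non-positive limit with at least one non-empty trimmed string, A returns a one-element
-- list (it appends before checking the limit) while B returns the plain slice uniq[:limit]
-- (empty for limit 0); B's is the intended "at most limit reasons" result.
def D_top_reasons_py (reasons : List String) (limit : Int) : Prop :=
  limit ≤ 0 ∧ ∃ r ∈ reasons, PySem.Str.strip r ≠ ""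
instance (reasons : List String) (limit : Int) : Decidable (D_top_reasons_py reasons limit) := by
  unfold D_top_reasons_py; infer_instance

def Spec_top_reasons_py (reasons : List String) (limit : Int) (out : List String) : Prop :=
  ¬ D_top_reasons_py reasons limit → out = top_reasons_py_alt reasons limit
instance (reasons : List String) (limit : Int) (out : List String) : Decidable (Spec_top_reasons_py reasons limit out) := by
  unfold Spec_top_reasons_py; infer_instance

def pvDiffWitness_top_reasons_py : List String × Int := (["x"], 0)
def pvDiffWitnessOut_top_reasons_py : (List String) × (List String) := (["x"], [])

-- ===== CLAIM (what is proved, stated in full; the proofs are below) =====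
def Claim_unchanged_top_reasons_py : Prop := ∀ (reasons : List String) (limit : Int), Dom_top_reasons_py reasons limit → Spec_top_reasons_py reasons limit (top_reasons_py reasons limit)
def Claim_changed_top_reasons_py : Prop := Dom_top_reasons_py (pvDiffWitness_top_reasons_py.1) (pvDiffWitness_top_reasons_py.2) ∧ D_top_reasons_py (pvDiffWitness_top_reasons_py.1) (pvDiffWitness_top_reasons_py.2) ∧ top_reasons_py (pvDiffWitness_top_reasons_py.1) (pvDiffWitness_top_reasons_py.2) = pvDiffWitnessOut_top_reasons_py.1 ∧ top_reasons_py_alt (pvDiffWitness_top_reasons_py.1) (pvDiffWitness_top_reasons_py.2) = pvDiffWitnessOut_top_reasons_py.2 ∧ pvDiffWitnessOut_top_reasons_py.1 ≠ pvDiffWitnessOut_top_reasons_py.2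

-- ===== LEMMAS AND PROOFS =====

-- cons-building form of Source B's dedup loop (proof helper)
def dedupB (vals : List String) : List String :=
  match vals with
  | [] => []
  | head :: tail =>
    let rest := dedupB (tail.filter (fun v => v != head))
    if head != "" then head :: rest else rest
termination_by vals.length
decreasing_by
  simp only [List.length_unattach]
  exact Nat.lt_succ_of_le (le_trans (List.length_filter_le _ _) (le_of_eq List.length_attach))

theorem dedupLoop_eq : ∀ (n : Nat) (vals uniq : List String), vals.length ≤ n →
    dedupLoop vals uniq = uniq ++ dedupB vals := by
  intro n
  induction n with
  | zero =>
    intro vals uniq hl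
    rw [List.length_eq_zero_iff.1 (Nat.le_zero.1 hl)]
    simp [dedupLoop, dedupB]
  | succ n ih =>
    intro vals uniq hl
    match vals with
    | [] => simp [dedupLoop, dedupB]
    | h :: t =>
      simp only [List.length_cons, Nat.succ_le_succ_iff] at hl
      have hlen : (t.filter (fun v => v != h)).length ≤ n :=
        le_trans (List.length_filter_le _ _) hl
      by_cases hh : h = ""
      · subst hh
        simp only [dedupLoop, dedupB, bne_self_eq_false, Bool.false_eq_true, if_false]
        exact ih _ _ hlen
      · have hb : (h != "") = true := bne_iff_ne.2 hh
        simp only [dedupLoop, dedupB, hb, if_true]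
        rw [ih _ _ hlen]
        simp

-- the fresh, non-empty values of l relative to a seen-set (A's loop without the limit)
def uniqNewS (l : List String) (seen : PySem.Set String) : List String :=
  match l with
  | [] => []
  | r :: rest =>
    if r = "" ∨ PySem.Set.contains seen r then uniqNewS rest seen
    else r :: uniqNewS rest (PySem.Set.add seen r)

-- A's loop appends the first (max (limit - len out) 1) fresh values
theorem topLoopA_eq (rs : List String) (out : List String) (seen : PySem.Set String) (limit : Int) :
    topLoopA rs out seen limit =
      out ++ List.take (max (limit - out.length) 1).toNat
        (uniqNewS (rs.map PySem.Str.strip) seen) := by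
  induction rs generalizing out seen with
  | nil => simp [topLoopA, uniqNewS]
  | cons r rest ih =>
    simp only [topLoopA, List.map_cons, uniqNewS]
    by_cases hg : PySem.Str.strip r = "" ∨ PySem.Set.contains seen (PySem.Str.strip r)
    · rw [if_pos hg, if_pos hg, ih]
    · rw [if_neg hg, if_neg hg]
      by_cases hb : limit ≤ ((out ++ [PySem.Str.strip r]).length : Int)
      · rw [if_pos hb]
        have h1 : (max (limit - out.length) 1).toNat = 1 := by
          simp at hb; omega
        simp [h1]
      · rw [if_neg hb, ih]
        have hlt : (out.length : Int) + 1 < limit := by simp at hb; omega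
        have h1 : (max (limit - out.length) 1).toNat =
            (max (limit - (out ++ [PySem.Str.strip r]).length) 1).toNat + 1 := by
          simp; omega
        simp [h1, List.take_succ_cons]

-- removing empty strings first does not change dedupB (an empty head is dropped and its
-- duplicates filtered out anyway)
theorem dedupB_drop_empty : ∀ (n : Nat) (l : List String), l.length ≤ n →
    dedupB (l.filter (fun v => v != "")) = dedupB l := by
  intro n
  induction n with
  | zero =>
    intro l hl
    rw [List.length_eq_zero_iff.1 (Nat.le_zero.1 hl)]
    simp
  | succ n ih =>
    intro l hl
    match l with
    | [] => simp
    | h :: t =>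
      simp only [List.length_cons, Nat.succ_le_succ_iff] at hl
      by_cases hh : h = ""
      · subst hh
        simp [dedupB]
      · have hb : (h != "") = true := bne_iff_ne.2 hh
        simp only [List.filter_cons, hb, if_pos, dedupB]
        congr 1
        rw [List.filter_filter]
        have hlen : (t.filter (fun v => v != h)).length ≤ n :=
          le_trans (List.length_filter_le _ _) hl
        rw [← ih _ hlen, List.filter_filter]
        exact congrArg _ (List.filter_congr (by intro x _; rw [Bool.and_comm]))

-- A's fresh-value list is B's dedup of the not-yet-seen values
theorem uniqNewS_eq_dedupB : ∀ (n : Nat) (l : List String) (s : PySem.Set String), l.length ≤ n →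
    uniqNewS l s = dedupB (l.filter (fun v => !(PySem.Set.contains s v))) := by
  intro n
  induction n with
  | zero =>
    intro l s hl
    rw [List.length_eq_zero_iff.1 (Nat.le_zero.1 hl)]
    simp [uniqNewS, dedupB]
  | succ n ih =>
    intro l s hl
    match l with
    | [] => simp [uniqNewS, dedupB]
    | r :: t =>
      simp only [List.length_cons, Nat.succ_le_succ_iff] at hl
      simp only [uniqNewS, List.filter_cons]
      by_cases hc : PySem.Set.contains s r
      · rw [if_pos (Or.inr hc)]
        simp only [hc, Bool.not_true, Bool.false_eq_true]
        exact ih t s hl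
      · have hc' : PySem.Set.contains s r = false := by
          exact Bool.not_eq_true _ ▸ Bool.of_not_eq_true hc
        simp only [hc', Bool.not_false, if_true]
        by_cases hr : r = ""
        · rw [if_pos (Or.inl hr)]
          subst hr
          simp only [dedupB, bne_self_eq_false, Bool.false_eq_true]
          rw [ih t s hl]
          have hde := dedupB_drop_empty (t.filter (fun v => !(PySem.Set.contains s v))).length
            (t.filter (fun v => !(PySem.Set.contains s v))) le_rfl
          rw [← hde, List.filter_filter]
          exact congrArg _ (List.filter_congr (by intro x _; rw [Bool.and_comm]))
        · rw [if_neg (by simp [hr])]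
          have hb : (r != "") = true := bne_iff_ne.2 hr
          simp only [dedupB, hb, if_true]
          congr 1
          rw [List.filter_filter, ih t (PySem.Set.add s r) hl]
          refine congrArg _ (List.filter_congr ?_)
          intro x _
          by_cases hx : x ∈ s <;> by_cases hxr : x = r <;>
            simp [PySem.Set.mem_add, hx, hxr, bne_iff_ne, Bool.and_comm]

theorem dedupB_eq_uniqNewS (l : List String) :
    dedupB l = uniqNewS l PySem.Set.empty := by
  rw [uniqNewS_eq_dedupB l.length l PySem.Set.empty le_rfl]
  congr 1
  simp [PySem.Set.contains, PySem.Set.empty]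

theorem uniqNewS_all_empty (l : List String) (s : PySem.Set String)
    (h : ∀ x ∈ l, x = "") : uniqNewS l s = [] := by
  induction l with
  | nil => rfl
  | cons r t ih =>
    simp only [uniqNewS, if_pos (Or.inl (h r (List.mem_cons_self)))]
    exact ih (fun x hx => h x (List.mem_cons_of_mem _ hx))

-- ===== VERDICT (by name: the statements are the Claim_ definitions above) =====
theorem top_reasons_py_spec : Claim_unchanged_top_reasons_py := by
  intro reasons limit _ hD
  unfold top_reasons_py top_reasons_py_alt
  rw [topLoopA_eq, dedupLoop_eq (reasons.map PySem.Str.strip).length _ _ le_rfl,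
    List.nil_append, dedupB_eq_uniqNewS]
  by_cases hl : 1 ≤ limit
  · rw [PySem.List.slice_to _ (show (0:Int) ≤ limit by omega)]
    have : max (limit - (([] : List String).length : Int)) 1 = limit := by simp; omega
    rw [this]
    simp
  · have hall : ∀ x ∈ reasons.map PySem.Str.strip, x = "" := by
      intro x hx
      rcases List.mem_map.1 hx with ⟨r, hr, rfl⟩
      by_contra hne
      exact hD ⟨by omega, r, hr, hne⟩
    rw [uniqNewS_all_empty _ _ hall]
    simp [PySem.List.slice]

theorem top_reasons_py_changed : Claim_changed_top_reasons_py := by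
  unfold Claim_changed_top_reasons_py; decide
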